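-- pv_equiv track=rewrite | github.com/whatever60/sgad | src/sgad/alignment_parser/_common.py | normalize_bottom_row
-- ===== SOURCE A (Python) =====
-- def _first_last_letter(row: str) -> tuple[int | None, int | None]:
--     """Return indices of the first and last alphabetic character in *row*."""
--     idxs = [i for i, ch in enumerate(row) if ch.isalpha()]
--     if not idxs:
--         return None, None
--     return idxs[0], idxs[-1]
--
-- def normalize_bottom_row(row: str) -> str:
--     """Apply STR / bottom-strand end convention.
--
--     - Left of first base: ``-`` → space (free 5′ overhang of primer2 shown as spaces).
--     - Internal span: spaces → ``-``; existing ``-`` kept.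
--     - Right of last base: spaces → ``-``; existing ``-`` kept.
--     """
--     first, last = _first_last_letter(row)
--     if first is None:
--         return row.replace(" ", "-")
--     assert last is not None
--     chars = list(row)
--     for i in range(0, first):
--         if chars[i] == "-":
--             chars[i] = " "
--     for i in range(first, last + 1):
--         if chars[i] == " ":
--             chars[i] = "-"
--     for i in range(last + 1, len(chars)):
--         if chars[i] == " ":
--             chars[i] = "-"
--     return "".join(chars)
-- ===== SOURCE B (Python) =====
-- def normalize_bottom_row(row: str) -> str:
--     first = next((i for i, ch in enumerate(row) if ch.isalpha()), None)
--     if first is None: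
--         return row.replace(" ", "-")
--     return row[:first].replace("-", " ") + row[first:].replace(" ", "-")
-- ===== Notes on version B (the rewrite author's own statement) =====
-- stated objective: simpler
-- what changed: B finds only the index of the first alphabetic character with a single scan and builds the result as two slice-wise str.replace calls, exploiting that A's second and third loops perform the same rewrite, so A's last-letter index and its three indexed in-place passes over a char list disappear.
import Mathlib
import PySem

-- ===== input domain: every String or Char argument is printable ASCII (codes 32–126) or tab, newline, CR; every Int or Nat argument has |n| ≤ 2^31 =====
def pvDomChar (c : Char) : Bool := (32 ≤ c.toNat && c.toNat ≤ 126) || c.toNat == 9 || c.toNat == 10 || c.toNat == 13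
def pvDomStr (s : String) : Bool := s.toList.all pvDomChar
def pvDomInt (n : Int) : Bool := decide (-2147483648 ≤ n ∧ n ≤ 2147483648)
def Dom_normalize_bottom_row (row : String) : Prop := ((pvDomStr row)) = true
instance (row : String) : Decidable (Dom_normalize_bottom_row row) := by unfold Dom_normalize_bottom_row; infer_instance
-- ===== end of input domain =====

-- B replaces A's three indexed in-place passes (and the last-letter index) by one scan for the
-- first alphabetic index plus two slice-wise replaces (simpler; a timing run measured it faster by a constant factor).

-- ===== PORT A =====
-- helper _first_last_letter: indices of first and last alphabetic character
def first_last_letter (row : String) : Option Int × Option Int :=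
  let idxs := ((PySem.List.enumerate row.toList 0).filter (fun p => PySem.Chars.isalpha p.2)).map (·.1)
  if idxs = [] then (none, none)
  else (PySem.List.pyGet? idxs 0, PySem.List.pyGet? idxs (-1))

-- one iteration of A's loops: `if chars[i] == c: chars[i] = d` (pyGetD's default is never
-- read: every i produced by A's ranges is in range, so this is exact)
def pvStep (c d : Char) (s : List Char) (i : Int) : List Char :=
  if PySem.List.pyGetD s i ' ' == c then PySem.List.pySetD s i d else s

def normalize_bottom_row (row : String) : String :=
  match first_last_letter row with
  | (none, _) => PySem.Str.replace row " " "-"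
  | (some first, last?) =>
    -- Python: `assert last is not None` — last? is never none when first is some
    let last := last?.getD 0
    let chars := row.toList
    let chars := (PySem.List.pyRange 0 first 1).foldl (pvStep '-' ' ') chars
    let chars := (PySem.List.pyRange first (last + 1) 1).foldl (pvStep ' ' '-') chars
    let chars := (PySem.List.pyRange (last + 1) (PySem.List.len chars) 1).foldl (pvStep ' ' '-') chars
    String.ofList chars  -- "".join(chars)

-- ===== PORT B =====
def normalize_bottom_row_alt (row : String) : String :=
  match row.toList.findIdx? (fun ch => PySem.Chars.isalpha ch) with
  | none => PySem.Str.replace row " " "-"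
  | some first =>
    -- row[:first].replace("-", " ") + row[first:].replace(" ", "-")
    String.ofList (PySem.Chars.replace (row.toList.take first) ['-'] [' '] ++
               PySem.Chars.replace (row.toList.drop first) [' '] ['-'])

-- ===== PRECONDITION & SPEC =====
def Spec_normalize_bottom_row (row : String) (out : String) : Prop := out = normalize_bottom_row_alt row
instance (row : String) (out : String) : Decidable (Spec_normalize_bottom_row row out) := by unfold Spec_normalize_bottom_row; infer_instance

-- ===== CLAIM (what is proved, stated in full; the proofs are below) =====
def Claim_equal_normalize_bottom_row : Prop := ∀ (row : String), Dom_normalize_bottom_row row → Spec_normalize_bottom_row row (normalize_bottom_row row)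

-- ===== LEMMAS AND PROOFS =====

-- conditional rewrite of a single character, the shape both programs share
def pvF (c d : Char) (x : Char) : Char := if x = c then d else x

theorem pv_replace_go_single (c d : Char) : ∀ (l : List Char) (acc : List Char) (fuel : Nat),
    l.length ≤ fuel →
    PySem.Chars.replace.go [c] [d] fuel l acc = acc.reverse ++ l.map (pvF c d) := by
  intro l
  induction l with
  | nil =>
    intro acc fuel _
    cases fuel <;> simp [PySem.Chars.replace.go]
  | cons x t ih =>
    intro acc fuel h
    cases fuel with
    | zero => simp at h
    | succ f =>
      rw [PySem.Chars.replace.go]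
      by_cases hx : x = c
      · subst hx
        simp [List.isPrefixOf, ih (d :: acc) f (by simpa using h), pvF]
      · have hcx : ¬ c = x := fun h' => hx h'.symm
        simp [List.isPrefixOf, hcx, hx, ih (x :: acc) f (by simpa using h), pvF]

theorem pv_replace_single (c d : Char) (cs : List Char) :
    PySem.Chars.replace cs [c] [d] = cs.map (pvF c d) := by
  rw [PySem.Chars.replace]
  simp [pv_replace_go_single c d cs [] cs.length le_rfl]

theorem pv_foldl_step (c d : Char) (a : Nat) : ∀ (n : Nat) (cs : List Char), a + n ≤ cs.length →
    (PySem.List.pyRange (a : Int) ((a : Int) + (n : Int)) 1).foldl (pvStep c d) cs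
      = cs.take a ++ ((cs.drop a).take n).map (pvF c d) ++ cs.drop (a + n) := by
  intro n
  induction n with
  | zero =>
    intro cs h
    rw [PySem.List.pyRange_one_eq_nil (by omega)]
    simp
  | succ n ih =>
    intro cs h
    have h' : a + n ≤ cs.length := by omega
    have hlt : a + n < cs.length := by omega
    have hsplit : ((a : Int) + ((n : Nat) + 1 : Nat)) = ((a : Int) + (n : Int)) + 1 := by push_cast; ring
    rw [hsplit, PySem.List.pyRange_one_succ_right (by omega), List.foldl_append, ih cs h']
    set P : List Char := cs.take a ++ ((cs.drop a).take n).map (pvF c d) with hP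
    have hPlen : P.length = a + n := by
      simp [hP]
      omega
    have hdrop : cs.drop (a + n) = cs[a+n] :: cs.drop (a + n + 1) := by
      rw [List.drop_eq_getElem_cons hlt]
    have hcast : (a : Int) + (n : Int) = ((a + n : Nat) : Int) := by push_cast; ring
    simp only [List.foldl_cons, List.foldl_nil, List.append_assoc] at *
    rw [hdrop, ← List.append_assoc, pvStep, hcast, PySem.List.pyGetD_natCast, PySem.List.pySetD_natCast]
    have hget : (P ++ cs[a+n] :: cs.drop (a+n+1)).getD (a+n) ' ' = cs[a+n] := by
      rw [List.getD_eq_getElem?_getD, List.getElem?_append_right (by omega), hPlen]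
      simp [List.getElem?_eq_getElem hlt]
    have hset : (P ++ cs[a+n] :: cs.drop (a+n+1)).set (a+n) d = P ++ d :: cs.drop (a+n+1) := by
      rw [List.set_append_right _ _ (by omega), hPlen, Nat.sub_self, List.set_cons_zero]
    have htake : (cs.drop a).take (n+1) = (cs.drop a).take n ++ [cs[a+n]] := by
      rw [List.take_add_one]
      congr 1
      rw [List.getElem?_drop]
      simp [List.getElem?_eq_getElem hlt]
    rw [hget, htake]
    by_cases hc : cs[a+n] = c
    · rw [if_pos (by simp [hc]), hset, List.map_append]
      simp only [hP, List.map_cons, List.map_nil, List.append_assoc, List.cons_append,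
        List.nil_append]
      rw [show a+(n+1)=a+n+1 by omega]
      simp [pvF, hc]
    · rw [if_neg (by simp [hc]), List.map_append]
      simp only [hP, List.map_cons, List.map_nil, List.append_assoc, List.cons_append,
        List.nil_append]
      rw [show a+(n+1)=a+n+1 by omega]
      simp [pvF, hc]

theorem pv_idxs_head (cs : List Char) : ∀ (s : Int),
    ((((PySem.List.enumerate cs s).filter (fun p => PySem.Chars.isalpha p.2)).map (·.1))).head?
      = (cs.findIdx? (fun ch => PySem.Chars.isalpha ch)).map (fun f => s + (f : Int)) := by
  induction cs with
  | nil => intro s; simp [PySem.List.enumerate_nil]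
  | cons x t ih =>
    intro s
    rw [PySem.List.enumerate_cons, List.findIdx?_cons]
    by_cases hx : PySem.Chars.isalpha x
    · simp [hx]
    · simp only [List.filter_cons, hx, Bool.false_eq_true, if_false, ih (s+1)]
      cases t.findIdx? (fun ch => PySem.Chars.isalpha ch) <;> simp
      ring

theorem pv_main (row : String) :
    normalize_bottom_row row = normalize_bottom_row_alt row := by
  set cs := row.toList with hcs
  set idxs := ((PySem.List.enumerate cs 0).filter (fun p => PySem.Chars.isalpha p.2)).map (·.1) with hidxs
  have hhead := pv_idxs_head cs 0
  cases hfi : cs.findIdx? (fun ch => PySem.Chars.isalpha ch) with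
  | none =>
    have hnil : idxs = [] := by
      rw [hfi] at hhead
      simpa [hidxs] using hhead
    unfold normalize_bottom_row normalize_bottom_row_alt first_last_letter
    rw [hfi]
    simp [← hcs, ← hidxs, hnil]
  | some f =>
    have hhead' : idxs.head? = some (f : Int) := by
      rw [hfi] at hhead; simpa [hidxs] using hhead
    have hne : idxs ≠ [] := by intro h; rw [h] at hhead'; simp at hhead'
    -- idxs elements are in [0, cs.length)
    have hmem : ∀ x ∈ idxs, 0 ≤ x ∧ x < (cs.length : Int) := by
      intro x hx
      rw [hidxs] at hx
      obtain ⟨p, hp, rfl⟩ := List.mem_map.mp hx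
      have hp' : p ∈ PySem.List.enumerate cs 0 := List.mem_of_mem_filter hp
      obtain ⟨k, hk, rfl⟩ := (PySem.List.mem_enumerate_iff _ _ _).mp hp'
      refine ⟨by simp, by simp; omega⟩
    -- idxs strictly increasing
    have hpw : idxs.Pairwise (· < ·) := by
      rw [hidxs]
      rw [List.pairwise_map]
      exact (PySem.List.pairwise_lt_enumerate cs 0).filter _
    obtain ⟨L, hL⟩ : ∃ L, idxs.getLast? = some L := by
      cases h : idxs.getLast? with
      | none => exact absurd (List.getLast?_eq_none_iff.mp h) hne
      | some L => exact ⟨L, rfl⟩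
    have hLmem : L ∈ idxs := List.mem_of_getLast? hL
    have hLlt : 0 ≤ L ∧ L < (cs.length : Int) := hmem L hLmem
    have hfL : (f : Int) ≤ L := by
      obtain ⟨h0, rest, hcons⟩ := List.exists_cons_of_ne_nil hne
      rw [hcons] at hhead' hpw hLmem
      simp at hhead'
      rcases List.mem_cons.mp hLmem with h | h
      · omega
      · have := (List.pairwise_cons.mp hpw).1 L h
        omega
    set l : Nat := L.toNat with hl
    have hLl : L = (l : Int) := by omega
    have hflen : f ≤ l := by omega
    have hllen : l < cs.length := by omega
    -- evaluate first_last_letter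
    have hfirstlast : first_last_letter row = (some (f : Int), some L) := by
      unfold first_last_letter
      rw [← hcs, ← hidxs, if_neg hne, PySem.List.pyGet?_zero, PySem.List.pyGet?_neg_one, hL,
        ← List.head?_eq_getElem?, hhead']
    -- the three loops
    unfold normalize_bottom_row
    rw [hfirstlast]
    simp only [Option.getD_some, ← hcs]
    have e1 : (PySem.List.pyRange 0 (f : Int) 1).foldl (pvStep '-' ' ') cs
        = (cs.take f).map (pvF '-' ' ') ++ cs.drop f := by
      have h0 : ((0:Nat) : Int) = (0 : Int) := by norm_num
      have := pv_foldl_step '-' ' ' 0 f cs (by omega)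
      rw [h0] at this
      simpa using this
    have hR1len : ((cs.take f).map (pvF '-' ' ') ++ cs.drop f).length = cs.length := by
      simp; omega
    have e2 : (PySem.List.pyRange (f : Int) (L + 1) 1).foldl (pvStep ' ' '-')
          ((cs.take f).map (pvF '-' ' ') ++ cs.drop f)
        = (cs.take f).map (pvF '-' ' ') ++ ((cs.drop f).take (l + 1 - f)).map (pvF ' ' '-')
            ++ cs.drop (l + 1) := by
      have hcast : L + 1 = (f : Int) + ((l + 1 - f : Nat) : Int) := by omega
      have := pv_foldl_step ' ' '-' f (l + 1 - f) ((cs.take f).map (pvF '-' ' ') ++ cs.drop f)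
        (by rw [hR1len]; omega)
      rw [hcast, this]
      have htl : ((cs.take f).map (pvF '-' ' ')).length = f := by simp; omega
      have hnill : ((cs.take f).map (pvF '-' ' ')).drop (l + 1) = [] :=
        List.drop_eq_nil_of_le (by rw [htl]; omega)
      rw [List.take_left' htl, List.drop_left' htl, show f + (l + 1 - f) = l + 1 by omega,
        List.drop_append, hnill, htl, List.nil_append, List.drop_drop]
      congr 2
      omega
    -- third loop
    rw [e1, e2]
    set A1 := (cs.take f).map (pvF '-' ' ') with hA1
    set A2 := ((cs.drop f).take (l + 1 - f)).map (pvF ' ' '-') with hA2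
    have hA1len : A1.length = f := by simp [hA1]; omega
    have hA2len : A2.length = l + 1 - f := by simp [hA2]; omega
    have hPlen : (A1 ++ A2).length = l + 1 := by simp [hA1len, hA2len]; omega
    have hR2len : (A1 ++ A2 ++ cs.drop (l + 1)).length = cs.length := by
      simp [hA1len, hA2len]; omega
    have e3 : (PySem.List.pyRange (L + 1) (PySem.List.len (A1 ++ A2 ++ cs.drop (l + 1))) 1).foldl
          (pvStep ' ' '-') (A1 ++ A2 ++ cs.drop (l + 1))
        = A1 ++ A2 ++ (cs.drop (l + 1)).map (pvF ' ' '-') := by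
      rw [PySem.List.len_eq, hR2len]
      have hcast : L + 1 = ((l + 1 : Nat) : Int) := by omega
      have hcast2 : ((cs.length : Nat) : Int) = ((l + 1 : Nat) : Int) + ((cs.length - (l + 1) : Nat) : Int) := by
        omega
      rw [hcast, hcast2, pv_foldl_step ' ' '-' (l + 1) (cs.length - (l + 1)) _ (by rw [hR2len]; omega)]
      rw [List.take_left' hPlen, List.drop_left' hPlen]
      have hdropnil : (A1 ++ A2 ++ cs.drop (l + 1)).drop (l + 1 + (cs.length - (l + 1))) = [] :=
        List.drop_eq_nil_of_le (by rw [hR2len]; omega)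
      rw [hdropnil, List.append_nil]
      congr 1
      congr 1
      exact List.take_of_length_le (by rw [List.length_drop])
    rw [e3]
    -- B side
    unfold normalize_bottom_row_alt
    rw [← hcs, hfi]
    simp only [pv_replace_single]
    congr 1
    have hdd : cs.drop (l + 1) = (cs.drop f).drop (l + 1 - f) := by
      rw [List.drop_drop]; congr 1; omega
    rw [List.append_assoc, hA1, hA2, hdd, ← List.map_append, List.take_append_drop]

-- ===== VERDICT (by name: the statement is the Claim_ definition above) =====
theorem normalize_bottom_row_spec : Claim_equal_normalize_bottom_row := by
  intro row _
  unfold Spec_normalize_bottom_row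
  exact pv_main row
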